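-- pv_equiv track=rewrite | github.com/th789/evolm | evaluation/cot-eval-harness/cot_eval/evaluation/Evaluator.py | parse_NLI_answer
-- ===== SOURCE A (Python) =====
-- def parse_NLI_answer(answer: str):
--     answer = answer.lower().strip()
--
--     true_words = ["yes", "true", "correct"]
--     false_words = ["no", "false", "incorrect"]
--     uncertain_words = ["unknown", "unanswerable", "uncertain"]
--
--     try:
--         if any(x in answer for x in true_words):
--             assert not any(x in answer for x in false_words), f"Answer contains both true and false words: {answer}"
--             assert not any(
--                 x in answer for x in uncertain_words
--             ), f"Answer contains both true and uncertain words: {answer}"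
--             return "true"
--         elif any(x in answer for x in false_words):
--             assert not any(x in answer for x in true_words), f"Answer contains both false and true words: {answer}"
--             assert not any(
--                 x in answer for x in uncertain_words
--             ), f"Answer contains both false and uncertain words: {answer}"
--             return "false"
--         elif any(x in answer for x in uncertain_words):
--             assert not any(
--                 x in answer for x in true_words
--             ), f"Answer contains both uncertain and true words: {answer}"
--             assert not any(
--                 x in answer for x in false_words
--             ), f"Answer contains both uncertain and false words: {answer}"
--             return "uncertain"
--         else:
--             return None
--     except AssertionError as e:
--         return None
-- ===== SOURCE B (Python) =====
-- def parse_NLI_answer(answer: str):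
--     answer = answer.lower().strip()
--     groups = [
--         ("true", ["yes", "true", "correct"]),
--         ("false", ["no", "false", "incorrect"]),
--         ("uncertain", ["unknown", "unanswerable", "uncertain"]),
--     ]
--     matched = [label for label, words in groups if any(w in answer for w in words)]
--     return matched[0] if len(matched) == 1 else None
-- ===== Notes on version B (the rewrite author's own statement) =====
-- stated objective: simpler
-- what changed: Replaces the ordered if/elif chain with assert/try-except control flow by building the list of matched label groups and returning the label only when exactly one group matched, eliminating exceptions.
import Mathlib
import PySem

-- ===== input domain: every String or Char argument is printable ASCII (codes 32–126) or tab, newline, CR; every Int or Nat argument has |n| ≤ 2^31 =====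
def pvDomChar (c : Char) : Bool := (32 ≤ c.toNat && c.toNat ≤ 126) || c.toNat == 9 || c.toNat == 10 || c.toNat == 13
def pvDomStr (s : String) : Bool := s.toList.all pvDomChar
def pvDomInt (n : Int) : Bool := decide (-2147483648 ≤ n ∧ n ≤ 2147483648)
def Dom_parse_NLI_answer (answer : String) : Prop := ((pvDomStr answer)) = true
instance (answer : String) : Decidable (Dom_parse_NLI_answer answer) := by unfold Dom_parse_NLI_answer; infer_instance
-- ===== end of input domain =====

-- B replaces A's if/elif chain with assert-driven try/except by an 'exactly one
-- group matched' test over the list of matched labels (simpler; no exceptions).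

-- ===== PORT A =====
-- A's asserts inside the taken branch return None (caught AssertionError); ported
-- as nested ifs in the same order as the Python branches.
def parse_NLI_answer (answer : String) : Option String :=
  let a := PySem.Str.strip (PySem.Str.lower answer)
  let true_words : List String := ["yes", "true", "correct"]
  let false_words : List String := ["no", "false", "incorrect"]
  let uncertain_words : List String := ["unknown", "unanswerable", "uncertain"]
  if true_words.any (fun x => PySem.Str.isIn x a) then
    if false_words.any (fun x => PySem.Str.isIn x a) then none
    else if uncertain_words.any (fun x => PySem.Str.isIn x a) then none
    else some "true"
  else if false_words.any (fun x => PySem.Str.isIn x a) then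
    if true_words.any (fun x => PySem.Str.isIn x a) then none
    else if uncertain_words.any (fun x => PySem.Str.isIn x a) then none
    else some "false"
  else if uncertain_words.any (fun x => PySem.Str.isIn x a) then
    if true_words.any (fun x => PySem.Str.isIn x a) then none
    else if false_words.any (fun x => PySem.Str.isIn x a) then none
    else some "uncertain"
  else none

-- ===== PORT B =====
def parse_NLI_answer_alt (answer : String) : Option String :=
  let a := PySem.Str.strip (PySem.Str.lower answer)
  let groups : List (String × List String) :=
    [("true", ["yes", "true", "correct"]),
     ("false", ["no", "false", "incorrect"]),
     ("uncertain", ["unknown", "unanswerable", "uncertain"])]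
  let matched := (groups.filter (fun g => g.2.any (fun w => PySem.Str.isIn w a))).map (·.1)
  if matched.length == 1 then matched[0]? else none

-- ===== PRECONDITION & SPEC =====
def Spec_parse_NLI_answer (answer : String) (out : Option String) : Prop := out = parse_NLI_answer_alt answer
instance (answer : String) (out : Option String) : Decidable (Spec_parse_NLI_answer answer out) := by unfold Spec_parse_NLI_answer; infer_instance

-- ===== CLAIM (what is proved, stated in full; the proofs are below) =====
def Claim_equal_parse_NLI_answer : Prop := ∀ (answer : String), Dom_parse_NLI_answer answer → Spec_parse_NLI_answer answer (parse_NLI_answer answer)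

-- ===== LEMMAS AND PROOFS =====

-- ===== VERDICT (by name: the statement is the Claim_ definition above) =====
theorem parse_NLI_answer_spec : Claim_equal_parse_NLI_answer := by
  intro answer _
  unfold Spec_parse_NLI_answer parse_NLI_answer parse_NLI_answer_alt
  simp only [List.any_cons, List.any_nil, List.filter_cons, List.filter_nil, Bool.or_false]
  generalize (PySem.Str.isIn "yes" (PySem.Str.strip (PySem.Str.lower answer)) ||
      (PySem.Str.isIn "true" (PySem.Str.strip (PySem.Str.lower answer)) ||
        PySem.Str.isIn "correct" (PySem.Str.strip (PySem.Str.lower answer)))) = T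
  generalize (PySem.Str.isIn "no" (PySem.Str.strip (PySem.Str.lower answer)) ||
      (PySem.Str.isIn "false" (PySem.Str.strip (PySem.Str.lower answer)) ||
        PySem.Str.isIn "incorrect" (PySem.Str.strip (PySem.Str.lower answer)))) = F
  generalize (PySem.Str.isIn "unknown" (PySem.Str.strip (PySem.Str.lower answer)) ||
      (PySem.Str.isIn "unanswerable" (PySem.Str.strip (PySem.Str.lower answer)) ||
        PySem.Str.isIn "uncertain" (PySem.Str.strip (PySem.Str.lower answer)))) = U
  cases T <;> cases F <;> cases U <;> decide
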